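-- pv_equiv track=rewrite | github.com/osovv/aisd | LR-3/pack_items.py | pack_items
-- ===== SOURCE A (Python) =====
-- BOX_SIZE = 6
--
-- MAX_ITEM_SIZE = 4
--
-- def leq_k_count(items, k):
-- 	count = 0
-- 	for i in items:
-- 		if i <= k:
-- 			count += 1
-- 	return count
--
-- def pack_items(items):
-- 	boxes = {}
-- 	i = 1
-- 	while True:
-- 		boxes[i] = []
-- 		k = 0
-- 		while sum(boxes[i]) < BOX_SIZE:
-- 			elem_to_fit = min(BOX_SIZE - sum(boxes[i]) - k, MAX_ITEM_SIZE)
-- 			cnt = leq_k_count(items, elem_to_fit)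
-- 			if cnt <= 0:
-- 				break
-- 			if elem_to_fit in items:
-- 				boxes[i].append(elem_to_fit)
-- 				items.remove(elem_to_fit)
-- 				k = 0
-- 			else:
-- 				k += 1
-- 		if len(items) == 0:
-- 			break
-- 		i += 1
-- 	return boxes
-- ===== SOURCE B (Python) =====
-- def pack_items(items):
--     # Sort a copy descending once; each pick is "first element <= remaining cap".
--     # (Return-value equivalence only: unlike A, this does not empty the caller's list.)
--     pool = sorted(items, reverse=True)
--     boxes = {}
--     i = 1
--     while True:
--         box = []
--         s = 0
--         while s < 6:
--             cap = min(6 - s, 4)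
--             j = 0
--             while j < len(pool) and pool[j] > cap:
--                 j += 1
--             if j == len(pool):
--                 break
--             v = pool.pop(j)
--             box.append(v)
--             s += v
--         boxes[i] = box
--         if not pool:
--             break
--         i += 1
--     return boxes
-- ===== Notes on version B (the rewrite author's own statement) =====
-- stated objective: faster
-- what changed: B sorts a copy of the list descending once and fills each box by taking the first (= largest) element that fits the remaining capacity, with a running sum, instead of A's per-step re-summing of the box plus a probe that decrements a candidate value one by one and does a full count scan, a membership scan and a remove scan of the items for every candidate.
import Mathlib
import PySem

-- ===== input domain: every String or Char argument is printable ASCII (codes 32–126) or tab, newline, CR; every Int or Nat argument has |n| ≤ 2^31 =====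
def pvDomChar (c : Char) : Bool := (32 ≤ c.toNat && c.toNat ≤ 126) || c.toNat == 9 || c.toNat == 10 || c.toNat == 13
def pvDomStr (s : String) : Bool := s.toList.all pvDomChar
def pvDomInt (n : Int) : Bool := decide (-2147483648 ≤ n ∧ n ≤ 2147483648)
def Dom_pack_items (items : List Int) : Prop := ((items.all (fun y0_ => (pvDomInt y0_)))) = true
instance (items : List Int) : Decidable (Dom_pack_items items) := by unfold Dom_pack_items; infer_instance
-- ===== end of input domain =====

-- B sorts a copy of the list descending once and picks the first fitting element per step,
-- replacing A's per-step counting/membership/remove scans and its probe that decrements the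
-- candidate value one by one (objective: faster; A's probe is pseudo-polynomial in the items' magnitudes).
-- The equivalence proved here is about the RETURN value only: Python A empties the caller's list
-- in place, B does not mutate its argument.

-- ===== PORT A =====
def leq_k_count (items : List Int) (k : Int) : Int :=
  items.foldl (fun count i => if i ≤ k then count + 1 else count) 0

-- helper cited by scanPick's decreasing_by
theorem leq_k_count_eq (items : List Int) (k : Int) :
    leq_k_count items k = ((items.filter (fun x => x ≤ k)).length : Int) := by
  unfold leq_k_count
  suffices h : ∀ (c : Int), items.foldl (fun count i => if i ≤ k then count + 1 else count) c
      = c + ((items.filter (fun x => x ≤ k)).length : Int) by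
    simpa using h 0
  induction items with
  | nil => intro c; simp
  | cons x xs ih =>
    intro c
    by_cases hx : x ≤ k <;> simp [List.foldl, hx, ih] <;> push_cast <;> ring

-- the inner while's k-probe of A: returns the elem_to_fit that gets picked, none = inner break
-- termination measure lemma cited by scanPick's decreasing_by
theorem scanPick_dec (items box : List Int) (k : Int)
    (hcnt : ¬ leq_k_count items (min (6 - box.sum - k) 4) ≤ 0) :
    (6 - box.sum - (k + 1) - (items.min?.getD 0) + 8).toNat
      < (6 - box.sum - k - (items.min?.getD 0) + 8).toNat := by
  rw [leq_k_count_eq] at hcnt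
  have hne : (items.filter (fun x => x ≤ min (6 - box.sum - k) 4)) ≠ [] := by
    intro hnil; rw [hnil] at hcnt; simp at hcnt
  obtain ⟨x, hx⟩ := List.exists_mem_of_ne_nil _ hne
  rw [List.mem_filter] at hx
  obtain ⟨hxm, hxle⟩ := hx
  have hxle' : x ≤ min (6 - box.sum - k) 4 := by exact_mod_cast of_decide_eq_true hxle
  obtain ⟨m, hm⟩ : ∃ m, items.min? = some m := by
    rcases h' : items.min? with _ | m
    · exact absurd (List.min?_eq_none_iff.mp h') (List.ne_nil_of_mem hxm)
    · exact ⟨m, rfl⟩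
  have hmx : m ≤ x := (List.min?_eq_some_iff.mp hm).2 x hxm
  simp only [hm, Option.getD_some]
  omega

-- the inner while's k-probe of A: returns the elem_to_fit that gets picked, none = inner break
def scanPick (items box : List Int) (k : Int) : Option Int :=
  if box.sum < 6 then
    let etf := min (6 - box.sum - k) 4
    if leq_k_count items etf ≤ 0 then none
    else if etf ∈ items then some etf
    else scanPick items box (k + 1)
  else none
termination_by ((6 - box.sum - k) - (items.min?.getD 0) + 8).toNat
decreasing_by
  exact scanPick_dec items box k (by assumption)

-- helper cited by aInnerLoop's decreasing_by
theorem scanPick_mem (items box : List Int) (k v : Int) (h : scanPick items box k = some v) : v ∈ items := by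
  fun_induction scanPick items box k <;> simp_all

-- termination lemma cited by aInnerLoop's decreasing_by
theorem scanPick_erase_dec (items box : List Int) (v : Int) (h : scanPick items box 0 = some v) :
    (items.erase v).length < items.length := by
  have hv := scanPick_mem items box 0 v h
  have h1 := List.length_pos_of_mem hv
  rw [List.length_erase_of_mem hv]
  omega

def aInnerLoop (items box : List Int) : List Int × List Int :=
  match h : scanPick items box 0 with
  | none => (box, items)
  | some v => aInnerLoop (items.erase v) (box ++ [v])
termination_by items.length
decreasing_by
  exact scanPick_erase_dec items box v h

def aOuter : Nat → List Int → Int → List (Int × List Int) → List (Int × List Int)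
  | 0, _, _, boxes => boxes
  | fuel + 1, items, i, boxes =>
    let p := aInnerLoop items []
    let boxes' := boxes ++ [(i, p.1)]
    if p.2.length = 0 then boxes' else aOuter fuel p.2 (i + 1) boxes'

-- fuel only makes the 'while True' total; under Pre_ it is proved sufficient
def pack_items (items : List Int) : List (Int × List Int) :=
  aOuter (items.length + 1) items 1 []

-- ===== PORT B =====
def bScan (pool : List Int) (cap : Int) (j : Nat) : Nat :=
  if h : j < pool.length then
    if pool[j] > cap then bScan pool cap (j + 1) else j
  else j
termination_by pool.length - j

-- termination lemma cited by bInner's decreasing_by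
theorem length_eraseIdx_lt (l : List Int) (i : Nat) (h : i < l.length) :
    (l.eraseIdx i).length < l.length := by
  rw [List.length_eraseIdx, if_pos h]
  omega

-- cap = min(6 - s, 4) and j = bScan pool cap 0 are written inline
def bInner (pool box : List Int) (s : Int) : List Int × List Int :=
  if s < 6 then
    if h : bScan pool (min (6 - s) 4) 0 < pool.length then
      bInner (pool.eraseIdx (bScan pool (min (6 - s) 4) 0))
        (box ++ [pool[bScan pool (min (6 - s) 4) 0]])
        (s + pool[bScan pool (min (6 - s) 4) 0])
    else (box, pool)
  else (box, pool)
termination_by pool.length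
decreasing_by
  exact length_eraseIdx_lt pool _ h

def bOuter : Nat → List Int → Int → List (Int × List Int) → List (Int × List Int)
  | 0, _, _, boxes => boxes
  | fuel + 1, pool, i, boxes =>
    let p := bInner pool [] 0
    let boxes' := boxes ++ [(i, p.1)]
    if p.2 = [] then boxes' else bOuter fuel p.2 (i + 1) boxes'

def pack_items_alt (items : List Int) : List (Int × List Int) :=
  bOuter (items.length + 1) (PySem.List.sorted items (fun x => x) true) 1 []

-- ===== PRECONDITION & SPEC =====
-- A (and B) loop forever as soon as the remaining items are all > 4 (no item ever fits a box);
-- Pre_ is exactly the inputs on which the Python A returns.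
def Pre_pack_items (items : List Int) : Prop := ∀ x ∈ items, x ≤ 4
instance (items : List Int) : Decidable (Pre_pack_items items) := by unfold Pre_pack_items; infer_instance
def pvWitness_pack_items : List Int := [3, 1, 4, 1, 2]

def Spec_pack_items (items : List Int) (out : List (Int × List Int)) : Prop := out = pack_items_alt items
instance (items : List Int) (out : List (Int × List Int)) : Decidable (Spec_pack_items items out) := by unfold Spec_pack_items; infer_instance

-- ===== CLAIM (what is proved, stated in full; the proofs are below) =====
def Claim_equal_pack_items : Prop := ∀ (items : List Int), Dom_pack_items items → Pre_pack_items items → Spec_pack_items items (pack_items items)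

-- ===== LEMMAS AND PROOFS =====

theorem max?_perm (l l' : List Int) (h : l.Perm l') : l.max? = l'.max? := by
  cases h' : l'.max? with
  | none =>
      rw [List.max?_eq_none_iff] at h' ⊢
      exact (h' ▸ h).eq_nil
  | some m =>
      rw [List.max?_eq_some_iff] at h' ⊢
      exact ⟨h.mem_iff.mpr h'.1, fun b hb => h'.2 b (h.mem_iff.mp hb)⟩

-- A's k-probe picks the largest remaining item fitting the remaining capacity
theorem scanPick_spec (items box : List Int) (k : Int) :
    scanPick items box k =
      if box.sum < 6 then (items.filter (fun x => x ≤ min (6 - box.sum - k) 4)).max? else none := by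
  fun_induction scanPick items box k with
  | case1 k hlt etf hcnt =>
      have hetf : etf = min (6 - box.sum - k) 4 := rfl
      rw [if_pos hlt]
      rw [leq_k_count_eq, hetf] at hcnt
      have hnil : items.filter (fun x => x ≤ min (6 - box.sum - k) 4) = [] :=
        List.length_eq_zero_iff.mp (by omega)
      rw [hnil]
      rfl
  | case2 k hlt etf hcnt hmem =>
      have hetf : etf = min (6 - box.sum - k) 4 := rfl
      rw [if_pos hlt]
      symm
      rw [List.max?_eq_some_iff]
      refine ⟨List.mem_filter.mpr ⟨hetf ▸ hmem, by simp [hetf]⟩, ?_⟩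
      intro b hb
      exact hetf ▸ of_decide_eq_true (List.mem_filter.mp hb).2
  | case3 k hlt etf hcnt hmem ih =>
      have hetf : etf = min (6 - box.sum - k) 4 := rfl
      rw [hetf] at hmem
      rw [ih, if_pos hlt, if_pos hlt]
      congr 1
      apply List.filter_congr
      intro x hx
      have hxe : x ≠ min (6 - box.sum - k) 4 := fun he => hmem (he ▸ hx)
      simp only [decide_eq_decide]
      omega
  | case4 k hlt => rw [if_neg hlt]

theorem bScan_le (pool : List Int) (cap : Int) (j : Nat) (hj : j ≤ pool.length) :
    bScan pool cap j ≤ pool.length := by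
  fun_induction bScan pool cap j with
  | case1 j hj' hgt ih => exact ih (by omega)
  | case2 j hj' hgt => omega
  | case3 j hj' => omega

theorem bScan_prefix (pool : List Int) (cap : Int) (j : Nat) :
    ∀ t (ht : t < pool.length), j ≤ t → t < bScan pool cap j → pool[t] > cap := by
  fun_induction bScan pool cap j with
  | case1 j hj hgt ih =>
      intro t ht h1 h2
      rcases Nat.eq_or_lt_of_le h1 with he | hlt
      · exact he ▸ hgt
      · exact ih t ht hlt h2
  | case2 j hj hgt => intro t ht h1 h2; omega
  | case3 j hj => intro t ht h1 h2; omega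

theorem bScan_hit (pool : List Int) (cap : Int) (j : Nat) :
    ∀ v, pool[bScan pool cap j]? = some v → v ≤ cap := by
  fun_induction bScan pool cap j with
  | case1 j hj hgt ih => exact ih
  | case2 j hj hgt =>
      intro v hv
      rw [List.getElem?_eq_getElem hj] at hv
      cases hv
      omega
  | case3 j hj =>
      intro v hv
      rw [List.getElem?_eq_none (by omega)] at hv
      cases hv

theorem erase_eq_eraseIdx_of_prefix_ne (l : List Int) :
    ∀ (r : Nat) (hr : r < l.length), (∀ t (ht : t < l.length), t < r → l[t] ≠ l[r]) →
    l.erase l[r] = l.eraseIdx r := by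
  induction l with
  | nil => intro r hr _; simp at hr
  | cons x xs ih =>
      intro r hr hpre
      cases r with
      | zero => simp
      | succ rr =>
          have hx : x ≠ (x :: xs)[rr + 1] := hpre 0 (by omega) (by omega)
          simp only [List.getElem_cons_succ] at hx ⊢
          rw [List.eraseIdx_cons_succ, List.erase_cons_tail (by simpa using hx)]
          congr 1
          exact ih rr (by simpa using hr) (fun t ht hlt => by
            have := hpre (t + 1) (by simpa using Nat.succ_lt_succ ht) (Nat.succ_lt_succ hlt)
            simpa using this)

-- on a descending pool, the first fitting element is the largest fitting one
theorem bScan_max? (pool : List Int) (cap : Int) (hp : pool.Pairwise (fun a b => b ≤ a))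
    (h : bScan pool cap 0 < pool.length) :
    (pool.filter (fun x => x ≤ cap)).max? = some pool[bScan pool cap 0] := by
  rw [List.max?_eq_some_iff]
  constructor
  · exact List.mem_filter.mpr ⟨List.getElem_mem h,
      decide_eq_true (bScan_hit pool cap 0 _ (List.getElem?_eq_getElem h))⟩
  · intro b hb
    obtain ⟨hbm, hble⟩ := List.mem_filter.mp hb
    have hble : b ≤ cap := of_decide_eq_true hble
    obtain ⟨t, ht, hbt⟩ := List.mem_iff_getElem.mp hbm
    rcases Nat.lt_or_ge t (bScan pool cap 0) with hlt | hge
    · exact absurd (hbt ▸ bScan_prefix pool cap 0 t ht (Nat.zero_le _) hlt) (by omega)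
    · rcases Nat.eq_or_lt_of_le hge with he | hlt
      · have heq : pool[bScan pool cap 0]'h = pool[t]'ht := by congr 1
        rw [heq, hbt]
      · exact hbt ▸ (List.pairwise_iff_getElem.mp hp _ _ _ _ hlt)

theorem bScan_nofit (pool : List Int) (cap : Int) (h : bScan pool cap 0 = pool.length) :
    (pool.filter (fun x => x ≤ cap)).max? = none := by
  rw [List.max?_eq_none_iff, List.filter_eq_nil_iff]
  intro x hx
  obtain ⟨t, ht, hxt⟩ := List.mem_iff_getElem.mp hx
  have := bScan_prefix pool cap 0 t ht (Nat.zero_le _) (h ▸ ht)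
  simp only [decide_eq_true_eq]
  omega

theorem aInnerLoop_sublist (items box : List Int) : (aInnerLoop items box).2.Sublist items := by
  fun_induction aInnerLoop items box with
  | case1 items box h => exact List.Sublist.refl items
  | case2 items box v h ih => exact ih.trans List.erase_sublist

theorem aInnerLoop_eq_none (items box : List Int) (h : scanPick items box 0 = none) :
    aInnerLoop items box = (box, items) := by
  rw [aInnerLoop]
  split
  · rfl
  · rename_i v hv; rw [h] at hv; cases hv

theorem aInnerLoop_eq_some (items box : List Int) (v : Int) (h : scanPick items box 0 = some v) :
    aInnerLoop items box = aInnerLoop (items.erase v) (box ++ [v]) := by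
  rw [aInnerLoop]
  split
  · rename_i hv; rw [h] at hv; cases hv
  · rename_i w hw; rw [h] at hw; cases hw; rfl

-- the two inner loops agree: same box, permuted remainders, B's remainder stays sorted
theorem inner_eq (n : Nat) : ∀ (pool items box : List Int), pool.length ≤ n →
    pool.Perm items → pool.Pairwise (fun a b => b ≤ a) →
    (bInner pool box box.sum).1 = (aInnerLoop items box).1 ∧
    (bInner pool box box.sum).2.Perm (aInnerLoop items box).2 ∧
    (bInner pool box box.sum).2.Pairwise (fun a b => b ≤ a) := by
  induction n with
  | zero =>
      intro pool items box hlen hperm hp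
      have hpool : pool = [] := List.length_eq_zero_iff.mp (by omega)
      subst hpool
      have hitems : items = [] := hperm.symm.eq_nil
      subst hitems
      by_cases hs : box.sum < 6
      · have hnone : scanPick [] box 0 = none := by
          rw [scanPick_spec, if_pos hs]; rfl
        rw [aInnerLoop_eq_none _ _ hnone, bInner, if_pos hs, dif_neg (by simp)]
        exact ⟨rfl, List.Perm.refl _, List.Pairwise.nil⟩
      · rw [aInnerLoop_eq_none _ _ (by rw [scanPick_spec, if_neg hs]), bInner, if_neg hs]
        exact ⟨rfl, List.Perm.refl _, List.Pairwise.nil⟩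
  | succ n ih =>
      intro pool items box hlen hperm hp
      by_cases hs : box.sum < 6
      · have hspec : scanPick items box 0 = (items.filter (fun x => x ≤ min (6 - box.sum) 4)).max? := by
          rw [scanPick_spec, if_pos hs]
          norm_num
        have hfperm : (pool.filter (fun x => x ≤ min (6 - box.sum) 4)).Perm
            (items.filter (fun x => x ≤ min (6 - box.sum) 4)) := hperm.filter _
        by_cases hr : bScan pool (min (6 - box.sum) 4) 0 < pool.length
        · -- pick case
          have hv := bScan_max? pool (min (6 - box.sum) 4) hp hr
          have hsome : scanPick items box 0 = some pool[bScan pool (min (6 - box.sum) 4) 0] := by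
            rw [hspec, ← max?_perm _ _ hfperm, hv]
          have hvcap : pool[bScan pool (min (6 - box.sum) 4) 0] ≤ min (6 - box.sum) 4 :=
            bScan_hit pool _ 0 _ (List.getElem?_eq_getElem hr)
          have herase : pool.erase pool[bScan pool (min (6 - box.sum) 4) 0]
              = pool.eraseIdx (bScan pool (min (6 - box.sum) 4) 0) := by
            apply erase_eq_eraseIdx_of_prefix_ne
            intro t ht hlt
            have := bScan_prefix pool (min (6 - box.sum) 4) 0 t ht (Nat.zero_le _) hlt
            omega
          rw [aInnerLoop_eq_some _ _ _ hsome, bInner, if_pos hs, dif_pos hr]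
          have hsum : box.sum + pool[bScan pool (min (6 - box.sum) 4) 0]
              = (box ++ [pool[bScan pool (min (6 - box.sum) 4) 0]]).sum := by
            simp
          rw [hsum]
          apply ih
          · have := List.length_eraseIdx (l := pool) (i := bScan pool (min (6 - box.sum) 4) 0)
            rw [if_pos hr] at this
            omega
          · rw [← herase]
            exact hperm.erase _
          · exact hp.sublist (List.eraseIdx_sublist ..)
        · -- no fit: both stop
          have hnone : scanPick items box 0 = none := by
            rw [hspec, ← max?_perm _ _ hfperm,
              bScan_nofit pool _ (by have := bScan_le pool (min (6 - box.sum) 4) 0 (Nat.zero_le _); omega)]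
          rw [aInnerLoop_eq_none _ _ hnone, bInner, if_pos hs, dif_neg hr]
          exact ⟨rfl, hperm, hp⟩
      · rw [aInnerLoop_eq_none _ _ (by rw [scanPick_spec, if_neg hs]), bInner, if_neg hs]
        exact ⟨rfl, hperm, hp⟩

-- under Pre_, every box removes at least one item: the fuel items.length + 1 suffices
theorem progress (items : List Int) (h4 : ∀ x ∈ items, x ≤ 4) (hne : items ≠ []) :
    (aInnerLoop items []).2.length < items.length := by
  have hfe : items.filter (fun x => x ≤ min (6 - (List.sum []) - 0) 4) = items := by
    apply List.filter_eq_self.mpr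
    intro x hx
    have := h4 x hx
    simp only [List.sum_nil, decide_eq_true_eq]
    omega
  have hspec : scanPick items [] 0 = items.max? := by
    rw [scanPick_spec, if_pos (by simp), hfe]
  obtain ⟨v, hv⟩ : ∃ v, items.max? = some v := by
    rcases h' : items.max? with _ | v
    · exact absurd (List.max?_eq_none_iff.mp h') hne
    · exact ⟨v, rfl⟩
  have hvm : v ∈ items := (List.max?_eq_some_iff.mp hv).1
  have hstep := aInnerLoop_eq_some items [] v (by rw [hspec, hv])
  rw [hstep]
  have hsub := aInnerLoop_sublist (items.erase v) ([] ++ [v])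
  have h1 := hsub.length_le
  have h2 := List.length_erase_of_mem hvm
  have h3 := List.length_pos_of_mem hvm
  omega

theorem outer_eq (fuel : Nat) : ∀ (items pool : List Int) (i : Int) (boxes : List (Int × List Int)),
    items.length < fuel → pool.Perm items → pool.Pairwise (fun a b => b ≤ a) →
    (∀ x ∈ items, x ≤ 4) →
    aOuter fuel items i boxes = bOuter fuel pool i boxes := by
  induction fuel with
  | zero => intro items pool i boxes hlen; omega
  | succ fuel ih =>
      intro items pool i boxes hlen hperm hp h4
      obtain ⟨h1, h2, h3⟩ := inner_eq pool.length pool items [] (Nat.le_refl _) hperm hp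
      simp only [aOuter, bOuter]
      have hz : (bInner pool [] 0) = (bInner pool [] (List.sum [])) := by norm_num
      by_cases hstop : (aInnerLoop items []).2.length = 0
      · have hq : (bInner pool [] 0).2 = [] := by
          rw [hz]
          exact List.length_eq_zero_iff.mp (h2.length_eq.trans hstop)
        rw [if_pos hstop, if_pos hq, hz, h1]
      · have hq : ¬ (bInner pool [] 0).2 = [] := by
          rw [hz]
          intro hnil
          rw [hnil] at h2
          exact hstop (List.length_eq_zero_iff.mpr h2.symm.eq_nil)
        rw [if_neg hstop, if_neg hq, hz, h1]
        have hne : items ≠ [] := by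
          intro hnil
          apply hstop
          rw [aInnerLoop_eq_none _ _ (by rw [hnil, scanPick_spec, if_pos (by simp)]; rfl), hnil]
          rfl
        apply ih
        · have := progress items h4 hne
          omega
        · exact h2
        · exact h3
        · intro x hx
          exact h4 x ((aInnerLoop_sublist items []).subset hx)

-- ===== VERDICT (by name: the statement is the Claim_ definition above) =====
theorem pack_items_spec : Claim_equal_pack_items := by
  intro items _ hpre
  unfold Spec_pack_items pack_items pack_items_alt
  have hperm : (PySem.List.sorted items (fun x => x) true).Perm items := PySem.List.sorted_perm items (fun x => x) true
  have hlen : (PySem.List.sorted items (fun x => x) true).length = items.length := hperm.length_eq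
  exact outer_eq (items.length + 1) items _ 1 [] (Nat.lt_succ_self _) hperm
    (PySem.List.sorted_pairwise_rev items (fun x => x)) hpre
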